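-- pv_equiv track=rewrite | github.com/mid-kid/pmdrtdx_passwords | dump/messagetool.py | decode_offsetlist
-- ===== SOURCE A (Python) =====
-- def decode_offsetlist(offsetlist):
--     offsets = []
--     append = 0
--     for bit in offsetlist:
--         if bit == 0:
--             break
--         if bit & 0x80:
--             append <<= 7
--             append |= bit & 0x7F
--             continue
--         bit &= 0x7F
--         if append:
--             bit |= append << 7
--             append = 0
--         if len(offsets) > 0:
--             bit += offsets[-1]
--         offsets.append(bit)
--     return offsets
-- ===== SOURCE B (Python) =====
-- def decode_offsetlist(offsetlist):
--     # pass 1: decode the varint delta values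
--     deltas = []
--     append = 0
--     for bit in offsetlist:
--         if bit == 0:
--             break
--         if bit & 0x80:
--             append = (append << 7) | (bit & 0x7F)
--         else:
--             deltas.append((append << 7) | (bit & 0x7F))
--             append = 0
--     # pass 2: prefix-sum the deltas into absolute offsets
--     offsets = []
--     cur = 0
--     for d in deltas:
--         cur += d
--         offsets.append(cur)
--     return offsets
-- ===== Notes on version B (the rewrite author's own statement) =====
-- stated objective: alternative
-- what changed: Split A's single stateful loop (which patches each emitted value with offsets[-1] and branches on whether an accumulator is pending) into two clear passes: one that decodes the varint deltas, and one that prefix-sums them into offsets.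
import Mathlib
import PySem

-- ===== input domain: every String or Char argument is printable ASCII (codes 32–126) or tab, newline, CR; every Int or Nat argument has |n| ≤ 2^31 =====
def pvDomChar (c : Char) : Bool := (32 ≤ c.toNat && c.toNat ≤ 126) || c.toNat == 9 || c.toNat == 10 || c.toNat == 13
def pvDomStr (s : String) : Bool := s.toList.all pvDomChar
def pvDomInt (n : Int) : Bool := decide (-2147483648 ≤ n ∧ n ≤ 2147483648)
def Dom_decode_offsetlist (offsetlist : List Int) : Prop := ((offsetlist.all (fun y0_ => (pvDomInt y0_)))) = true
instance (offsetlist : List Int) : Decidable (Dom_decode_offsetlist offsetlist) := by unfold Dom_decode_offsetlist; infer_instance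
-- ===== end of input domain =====

-- ===== PORT A =====
-- B splits A's single stateful loop into a varint-delta pass and a prefix-sum pass (alternative decomposition, same cost).
-- A-side helper: the single loop of A over (offsets, append)
def decode_offsetlist_loop (l : List Int) (offsets : List Int) (append : Int) : List Int :=
  match l with
  | [] => offsets
  | bit :: rest =>
    if bit = 0 then offsets
    else if PySem.Int.band bit 0x80 ≠ 0 then
      decode_offsetlist_loop rest offsets (PySem.Int.bor (append <<< 7) (PySem.Int.band bit 0x7F))
    else
      let bit1 := PySem.Int.band bit 0x7F
      let bit2 := if append ≠ 0 then PySem.Int.bor bit1 (append <<< 7) else bit1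
      -- offsets[-1] is only read under the length guard, where it is the last element
      let bit3 := if offsets.length > 0 then bit2 + ((PySem.List.pyGet? offsets (-1)).getD 0) else bit2
      decode_offsetlist_loop rest (offsets ++ [bit3]) 0

def decode_offsetlist (offsetlist : List Int) : List Int :=
  decode_offsetlist_loop offsetlist [] 0

-- ===== PORT B =====
-- pass 1 of B: decode the varint deltas (break on 0, drop a trailing partial accumulator)
def parse_deltas (l : List Int) (append : Int) : List Int :=
  match l with
  | [] => []
  | bit :: rest =>
    if bit = 0 then []
    else if PySem.Int.band bit 0x80 ≠ 0 then
      parse_deltas rest (PySem.Int.bor (append <<< 7) (PySem.Int.band bit 0x7F))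
    else
      PySem.Int.bor (append <<< 7) (PySem.Int.band bit 0x7F) :: parse_deltas rest 0

-- pass 2 of B: running prefix sum
def psum_loop (ds : List Int) (cur : Int) (offsets : List Int) : List Int :=
  match ds with
  | [] => offsets
  | d :: rest => psum_loop rest (cur + d) (offsets ++ [cur + d])

def decode_offsetlist_alt (offsetlist : List Int) : List Int :=
  psum_loop (parse_deltas offsetlist 0) 0 []

-- ===== PRECONDITION & SPEC =====
def Spec_decode_offsetlist (offsetlist : List Int) (out : List Int) : Prop := out = decode_offsetlist_alt offsetlist
instance (offsetlist : List Int) (out : List Int) : Decidable (Spec_decode_offsetlist offsetlist out) := by unfold Spec_decode_offsetlist; infer_instance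

-- ===== CLAIM (what is proved, stated in full; the proofs are below) =====
def Claim_equal_decode_offsetlist : Prop := ∀ (offsetlist : List Int), Dom_decode_offsetlist offsetlist → Spec_decode_offsetlist offsetlist (decode_offsetlist offsetlist)

-- ===== LEMMAS AND PROOFS =====
def psum (cur : Int) : List Int → List Int
  | [] => []
  | d :: rest => (cur + d) :: psum (cur + d) rest

theorem psum_loop_eq (ds : List Int) : ∀ (cur : Int) (offsets : List Int),
    psum_loop ds cur offsets = offsets ++ psum cur ds := by
  induction ds with
  | nil => intro cur offsets; simp [psum_loop, psum]
  | cons d rest ih => intro cur offsets; simp [psum_loop, psum, ih]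

theorem loop_eq (l : List Int) : ∀ (offsets : List Int) (append : Int),
    decode_offsetlist_loop l offsets append =
      offsets ++ psum (offsets.getLast?.getD 0) (parse_deltas l append) := by
  induction l with
  | nil => intro offsets append; simp [decode_offsetlist_loop, parse_deltas, psum]
  | cons bit rest ih =>
    intro offsets append
    by_cases h0 : bit = 0
    · simp [decode_offsetlist_loop, parse_deltas, psum, h0]
    · by_cases hh : PySem.Int.band bit 0x80 ≠ 0
      · simp [decode_offsetlist_loop, parse_deltas, h0, hh, ih]
      · have hδ : (if append ≠ 0 then
              PySem.Int.bor (PySem.Int.band bit 0x7F) (append <<< 7)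
            else PySem.Int.band bit 0x7F)
            = PySem.Int.bor (append <<< 7) (PySem.Int.band bit 0x7F) := by
          by_cases ha : append = 0
          · have hz : ∀ x : Int, PySem.Int.bor 0 x = x := fun x => by
              rw [PySem.Int.bor_comm]; simp
            simp [ha, show ((0:Int) <<< 7) = 0 from by decide, hz]
          · simp [ha, PySem.Int.bor_comm]
        by_cases hne : offsets = []
        · subst hne
          simp [decode_offsetlist_loop, parse_deltas, h0, hh, ih, hδ, psum]
        · have hlen : offsets.length > 0 := List.length_pos_iff.mpr hne
          simp only [decode_offsetlist_loop, parse_deltas, h0, hh, if_pos, ite_false,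
            hδ, hlen, PySem.List.pyGet?_neg_one offsets]
          rw [ih]
          simp [psum, Int.add_comm]

-- ===== VERDICT (by name: the statement is the Claim_ definition above) =====
theorem decode_offsetlist_spec : Claim_equal_decode_offsetlist := by
  intro l _
  unfold Spec_decode_offsetlist decode_offsetlist decode_offsetlist_alt
  rw [loop_eq, psum_loop_eq]
  rfl
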